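-- pv_equiv track=rewrite | github.com/ts207/dota-poly-signal-pnl | steam_client.py | _decode_top_live_side_towers
-- ===== SOURCE A (Python) =====
-- SIDE_TOWER_ALIVE_MASK = 0x7FF
--
-- def _decode_top_live_side_towers(progress_bits: int) -> int:
--     alive = (1 << 9) | (1 << 10)  # T4 state not decoded from TopLive.
--     for lane_base in (0, 3, 6):
--         group = (progress_bits >> lane_base) & 0b111
--         if group == 0:
--             destroyed_count = 3
--         else:
--             destroyed_count = max(i for i in range(3) if group & (1 << i))
--         for tier in range(destroyed_count, 3):
--             alive |= 1 << (lane_base + tier)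
--     return alive & SIDE_TOWER_ALIVE_MASK
-- ===== SOURCE B (Python) =====
-- SIDE_TOWER_ALIVE_MASK = 0x7FF
--
-- # Alive-tier mask for each 3-bit lane group: g == 0 -> no side towers alive;
-- # otherwise bits from the highest set bit of g up to bit 2 are alive.
-- _GROUP_ALIVE = (0, 0b111, 0b110, 0b110, 0b100, 0b100, 0b100, 0b100)
--
-- def _decode_top_live_side_towers(progress_bits: int) -> int:
--     alive = (1 << 9) | (1 << 10)  # T4 state not decoded from TopLive.
--     for lane_base in (0, 3, 6):
--         alive |= _GROUP_ALIVE[(progress_bits >> lane_base) & 0b111] << lane_base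
--     return alive & SIDE_TOWER_ALIVE_MASK
-- ===== Notes on version B (the rewrite author's own statement) =====
-- stated objective: simpler
-- what changed: Replaced A's per-lane inner max-over-set-bits scan plus tier loop by a single lookup in a precomputed 8-entry table mapping each 3-bit lane group directly to its alive-tier mask.
import Mathlib
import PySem

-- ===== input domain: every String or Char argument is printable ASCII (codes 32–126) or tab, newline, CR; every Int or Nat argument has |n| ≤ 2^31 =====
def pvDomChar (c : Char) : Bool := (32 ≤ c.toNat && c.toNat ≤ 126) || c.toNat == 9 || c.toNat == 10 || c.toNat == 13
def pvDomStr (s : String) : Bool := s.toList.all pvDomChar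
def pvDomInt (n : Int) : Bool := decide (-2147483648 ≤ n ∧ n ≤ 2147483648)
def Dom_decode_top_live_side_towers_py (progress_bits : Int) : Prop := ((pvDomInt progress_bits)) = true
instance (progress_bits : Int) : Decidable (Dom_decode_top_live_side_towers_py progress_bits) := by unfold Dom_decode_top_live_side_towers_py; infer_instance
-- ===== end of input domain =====

-- B replaces A's per-lane max-scan + tier loop by one constant 8-entry table lookup per lane (objective: simpler).


-- ===== PORT A =====
def decode_top_live_side_towers_py (progress_bits : Int) : Int :=
  let alive : Int := PySem.Int.bor ((1:Int) <<< (9:Nat)) ((1:Int) <<< (10:Nat))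
  let alive := ([0, 3, 6] : List Nat).foldl (fun (alive : Int) (lane_base : Nat) =>
    let group : Int := PySem.Int.band (progress_bits >>> lane_base) 7
    let destroyed_count : Int :=
      if group = 0 then 3
      else
        -- max(i for i in range(3) if group & (1 << i)): the filtered list is nonempty when
        -- group ≠ 0 (group ∈ [1,8)), so the .getD 0 default is unreachable
        ((((List.range 3).filter (fun i : Nat => PySem.Int.band group ((1:Int) <<< i) != 0)).map
          Int.ofNat).max?).getD 0
    (PySem.List.pyRange destroyed_count 3 1).foldl (fun alive tier =>
      -- tier ∈ [destroyed_count, 3) with destroyed_count ≥ 0, so the Python shift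
      -- amount lane_base + tier equals lane_base + tier.toNat
      PySem.Int.bor alive ((1:Int) <<< (lane_base + tier.toNat))) alive) alive
  PySem.Int.band alive 2047

-- ===== PORT B =====
def GROUP_ALIVE : List Int := [0, 7, 6, 6, 4, 4, 4, 4]

def decode_top_live_side_towers_py_alt (progress_bits : Int) : Int :=
  let alive := ([0, 3, 6] : List Nat).foldl (fun (alive : Int) (lane_base : Nat) =>
    -- index (progress_bits >> lane_base) & 0b111 is always in [0,8), so Python's
    -- tuple indexing is getD on its toNat
    PySem.Int.bor alive
      ((GROUP_ALIVE.getD (PySem.Int.band (progress_bits >>> lane_base) 7).toNat 0) <<< lane_base))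
    (PySem.Int.bor ((1:Int) <<< (9:Nat)) ((1:Int) <<< (10:Nat)))
  PySem.Int.band alive 2047

-- ===== PRECONDITION & SPEC =====
def Spec_decode_top_live_side_towers_py (progress_bits : Int) (out : Int) : Prop := out = decode_top_live_side_towers_py_alt progress_bits
instance (progress_bits : Int) (out : Int) : Decidable (Spec_decode_top_live_side_towers_py progress_bits out) := by unfold Spec_decode_top_live_side_towers_py; infer_instance

-- ===== CLAIM (what is proved, stated in full; the proofs are below) =====
def Claim_equal_decode_top_live_side_towers_py : Prop := ∀ (progress_bits : Int), Dom_decode_top_live_side_towers_py progress_bits → Spec_decode_top_live_side_towers_py progress_bits (decode_top_live_side_towers_py progress_bits)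

-- ===== LEMMAS AND PROOFS =====

-- x & 7 always lands in [0, 8), for every integer x (Python-exact band).
theorem pv_band7_bounds (x : Int) : 0 ≤ PySem.Int.band x 7 ∧ PySem.Int.band x 7 < 8 := by
  rw [PySem.Int.band.eq_1]
  split_ifs with h1 h2 h2 <;>
    first
      | omega
      | (have h := Nat.and_le_right (n := x.toNat) (m := (7:Int).toNat); omega)

-- ===== VERDICT (by name: the statement is the Claim_ definition above) =====
theorem decode_top_live_side_towers_py_spec : Claim_equal_decode_top_live_side_towers_py := by
  intro n _
  unfold Spec_decode_top_live_side_towers_py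
  simp only [decode_top_live_side_towers_py, decode_top_live_side_towers_py_alt,
    List.foldl_cons, List.foldl_nil]
  have h0 := pv_band7_bounds (n >>> (0:Nat))
  have h3 := pv_band7_bounds (n >>> (3:Nat))
  have h6 := pv_band7_bounds (n >>> (6:Nat))
  generalize hg0 : PySem.Int.band (n >>> (0:Nat)) 7 = g0 at h0 ⊢
  generalize hg3 : PySem.Int.band (n >>> (3:Nat)) 7 = g3 at h3 ⊢
  generalize hg6 : PySem.Int.band (n >>> (6:Nat)) 7 = g6 at h6 ⊢
  obtain ⟨h0a, h0b⟩ := h0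
  obtain ⟨h3a, h3b⟩ := h3
  obtain ⟨h6a, h6b⟩ := h6
  interval_cases g0 <;> interval_cases g3 <;> interval_cases g6 <;> decide
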